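-- pv_equiv track=rewrite | github.com/pypi-data/pypi-mirror-367 | packages/imagery24/imagery24-0.11.0-py3-none-any.whl/imagery24/tiles.py | get_tiles
-- ===== SOURCE A (Python) =====
-- from typing import Generator
--
-- def get_tiles(
--     layers_bounds: list[tuple[int, int, int, int]],
-- ) -> Generator[tuple[int, int, int], None, None]:
--     def process_tile(
--         layer: int, x: int, y: int
--     ) -> Generator[tuple[int, int, int], None, None]:
--         if layer < 0 or layer >= len(layers_bounds):
--             return
--
--         layer_bounds = layers_bounds[layer]
--
--         if x >= layer_bounds[2] or y >= layer_bounds[3]: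
--             return
--
--         if x < layer_bounds[0] or y < layer_bounds[1]:
--             return
--
--         for dy in range(2):
--             for dx in range(2):
--                 yield from process_tile(layer + 1, x * 2 + dx, y * 2 + dy)
--
--         yield (layer, x, y)
--
--     for y in range(layers_bounds[0][3]):
--         for x in range(layers_bounds[0][2]):
--             yield from process_tile(0, x, y)
-- ===== SOURCE B (Python) =====
-- def get_tiles(layers_bounds):
--     n = len(layers_bounds)
--     top = layers_bounds[0]
--     stack = [(0, x, y, False) for y in range(top[3]) for x in range(top[2])]
--     stack.reverse()
--     while stack:
--         layer, x, y, expanded = stack.pop()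
--         if expanded:
--             yield (layer, x, y)
--             continue
--         if layer >= n:
--             continue
--         x0, y0, x1, y1 = layers_bounds[layer]
--         if x >= x1 or y >= y1 or x < x0 or y < y0:
--             continue
--         stack.append((layer, x, y, True))
--         for dy in (1, 0):
--             for dx in (1, 0):
--                 stack.append((layer + 1, x * 2 + dx, y * 2 + dy, False))
-- ===== Notes on version B (the rewrite author's own statement) =====
-- stated objective: alternative
-- what changed: The recursive generator process_tile is replaced by an iterative explicit stack of (layer, x, y, expanded) frames: unexpanded frames are checked against the layer bounds and, on success, re-pushed expanded followed by their four children, reproducing the exact post-order stream without recursion.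
import Mathlib
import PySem

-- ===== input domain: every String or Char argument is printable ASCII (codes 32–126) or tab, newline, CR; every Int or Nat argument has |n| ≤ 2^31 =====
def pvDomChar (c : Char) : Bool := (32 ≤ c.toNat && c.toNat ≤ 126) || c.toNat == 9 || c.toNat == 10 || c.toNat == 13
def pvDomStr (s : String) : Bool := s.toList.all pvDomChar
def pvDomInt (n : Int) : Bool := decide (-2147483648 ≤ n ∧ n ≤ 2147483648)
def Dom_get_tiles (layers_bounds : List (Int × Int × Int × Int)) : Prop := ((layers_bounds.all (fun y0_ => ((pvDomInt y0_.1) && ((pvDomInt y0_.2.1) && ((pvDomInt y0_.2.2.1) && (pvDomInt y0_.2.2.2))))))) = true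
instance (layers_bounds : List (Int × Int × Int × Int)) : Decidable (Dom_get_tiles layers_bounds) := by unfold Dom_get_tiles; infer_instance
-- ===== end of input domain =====

-- B replaces A's recursive generator by an explicit stack of (layer,x,y,expanded) frames
-- producing the identical post-order stream; objective: alternative (same cost, no recursion).

-- ===== PORT A =====
-- A's inner recursive generator `process_tile`; yields collected into a list in yield order.
-- The two constant `range(2)` loops are unrolled ((dy,dx) = (0,0),(0,1),(1,0),(1,1) in loop order).
def processTile (layers_bounds : List (Int × Int × Int × Int)) (layer x y : Int) :
    List (Int × Int × Int) :=
  if _h1 : layer < 0 ∨ layer ≥ (layers_bounds.length : Int) then []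
  else
    match _h2 : PySem.List.pyGet? layers_bounds layer with
    | none => []  -- unreachable: 0 ≤ layer < len
    | some (x0, y0, x1, y1) =>
      if x ≥ x1 ∨ y ≥ y1 then []
      else if x < x0 ∨ y < y0 then []
      else
        (processTile layers_bounds (layer + 1) (x * 2) (y * 2) ++
         processTile layers_bounds (layer + 1) (x * 2 + 1) (y * 2) ++
         processTile layers_bounds (layer + 1) (x * 2) (y * 2 + 1) ++
         processTile layers_bounds (layer + 1) (x * 2 + 1) (y * 2 + 1)) ++
        [(layer, x, y)]
termination_by ((layers_bounds.length : Int) - layer).toNat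
decreasing_by all_goals omega

-- top level of A: for y in range(layers_bounds[0][3]): for x in range(layers_bounds[0][2]): yield from process_tile(0,x,y)
def get_tiles (layers_bounds : List (Int × Int × Int × Int)) : List (Int × Int × Int) :=
  match PySem.List.pyGet? layers_bounds 0 with
  | none => []  -- Python raises IndexError here; excluded by Pre_get_tiles
  | some b =>
    List.foldl
      (fun acc y =>
        List.foldl (fun acc x => acc ++ processTile layers_bounds 0 x y) acc
          (PySem.List.pyRange 0 b.2.2.1 1))
      [] (PySem.List.pyRange 0 b.2.2.2 1)

-- ===== PORT B =====
-- weight of a stack frame, used only as the loop's termination measure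
def tileWeight : Nat → Nat
  | 0 => 1
  | r + 1 => 4 * tileWeight r + 2

def frameWeight (layers_bounds : List (Int × Int × Int × Int)) (f : Int × Int × Int × Bool) : Nat :=
  if f.2.2.2 then 1 else tileWeight ((layers_bounds.length : Int) - f.1).toNat

theorem tileWeight_pos (r : Nat) : 0 < tileWeight r := by
  cases r <;> simp [tileWeight] <;> omega

def stackWeight (layers_bounds : List (Int × Int × Int × Int))
    (s : List (Int × Int × Int × Bool)) : Nat :=
  (s.map (frameWeight layers_bounds)).sum

-- B's while-loop. The Python stack pops from the END of the list; here the stack is kept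
-- top-first, so Python's append/pop at the end is cons/head here.
def loopB (layers_bounds : List (Int × Int × Int × Int)) :
    List (Int × Int × Int × Bool) → List (Int × Int × Int) → List (Int × Int × Int)
  | [], acc => acc
  | (layer, x, y, expanded) :: rest, acc =>
    if _h0 : expanded then loopB layers_bounds rest (acc ++ [(layer, x, y)])
    else if _h1 : layer ≥ (layers_bounds.length : Int) then loopB layers_bounds rest acc
    else
      match _h2 : PySem.List.pyGet? layers_bounds layer with
      | none => loopB layers_bounds rest acc  -- unreachable: frames always have 0 ≤ layer < len here
      | some (x0, y0, x1, y1) =>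
        if _h3 : x ≥ x1 ∨ y ≥ y1 ∨ x < x0 ∨ y < y0 then loopB layers_bounds rest acc
        else
          -- children pushed for dy in (1,0), dx in (1,0), then popped in reverse: top-first order below
          loopB layers_bounds
            ((layer + 1, x * 2, y * 2, false) ::
             (layer + 1, x * 2 + 1, y * 2, false) ::
             (layer + 1, x * 2, y * 2 + 1, false) ::
             (layer + 1, x * 2 + 1, y * 2 + 1, false) ::
             (layer, x, y, true) :: rest) acc
termination_by s _ => stackWeight layers_bounds s
decreasing_by
  · simp [stackWeight, frameWeight, _h0]
  · have h : ((layers_bounds.length : Int) - layer).toNat = 0 := by omega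
    simp [stackWeight, frameWeight, _h0, h, tileWeight]
  · have h := tileWeight_pos (((layers_bounds.length : Int) - layer).toNat)
    simp [stackWeight, frameWeight, _h0] <;> omega
  · have h := tileWeight_pos (((layers_bounds.length : Int) - layer).toNat)
    simp [stackWeight, frameWeight, _h0] <;> omega
  · have hr : ((layers_bounds.length : Int) - layer).toNat =
        ((layers_bounds.length : Int) - (layer + 1)).toNat + 1 := by omega
    have h := tileWeight_pos (((layers_bounds.length : Int) - (layer + 1)).toNat)
    simp [stackWeight, frameWeight, _h0, hr, tileWeight] <;> omega

-- top level of B: the initial frames in comprehension order (stack reversed, popped from the end)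
def get_tiles_alt (layers_bounds : List (Int × Int × Int × Int)) : List (Int × Int × Int) :=
  match PySem.List.pyGet? layers_bounds 0 with
  | none => []  -- Python raises IndexError here; excluded by Pre_get_tiles
  | some b =>
    loopB layers_bounds
      ((PySem.List.pyRange 0 b.2.2.2 1).flatMap
        (fun y => (PySem.List.pyRange 0 b.2.2.1 1).map (fun x => (0, x, y, false))))
      []

-- ===== PRECONDITION & SPEC =====
-- Pre_ excludes only the empty list, on which A (and B) raise IndexError at layers_bounds[0].
def Pre_get_tiles (layers_bounds : List (Int × Int × Int × Int)) : Prop := layers_bounds ≠ []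
instance (layers_bounds : List (Int × Int × Int × Int)) : Decidable (Pre_get_tiles layers_bounds) := by unfold Pre_get_tiles; infer_instance
def pvWitness_get_tiles : (List (Int × Int × Int × Int)) := [(0, 0, 2, 2), (0, 0, 3, 3)]

def Spec_get_tiles (layers_bounds : List (Int × Int × Int × Int)) (out : List (Int × Int × Int)) : Prop := out = get_tiles_alt layers_bounds
instance (layers_bounds : List (Int × Int × Int × Int)) (out : List (Int × Int × Int)) : Decidable (Spec_get_tiles layers_bounds out) := by unfold Spec_get_tiles; infer_instance

-- ===== CLAIM (what is proved, stated in full; the proofs are below) =====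
def Claim_equal_get_tiles : Prop := ∀ (layers_bounds : List (Int × Int × Int × Int)), Dom_get_tiles layers_bounds → Pre_get_tiles layers_bounds → Spec_get_tiles layers_bounds (get_tiles layers_bounds)

-- ===== LEMMAS AND PROOFS =====

-- the stream a single frame contributes
def frameSem (layers_bounds : List (Int × Int × Int × Int)) (f : Int × Int × Int × Bool) :
    List (Int × Int × Int) :=
  if f.2.2.2 then [(f.1, f.2.1, f.2.2.1)] else processTile layers_bounds f.1 f.2.1 f.2.2.1

-- main simulation lemma: on stacks whose frames all have nonnegative layer,
-- the stack loop emits acc ++ concatenation of the frames' streams.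
-- characterisation of A's process_tile by its three outcomes
theorem processTile_out (layers_bounds : List (Int × Int × Int × Int)) (layer x y : Int)
    (h : layer < 0 ∨ layer ≥ (layers_bounds.length : Int)) :
    processTile layers_bounds layer x y = [] := by
  rw [processTile.eq_def, dif_pos h]

theorem processTile_fail (layers_bounds : List (Int × Int × Int × Int)) (layer x y : Int)
    (h : ¬(layer < 0 ∨ layer ≥ (layers_bounds.length : Int)))
    (x0 y0 x1 y1 : Int) (hg : PySem.List.pyGet? layers_bounds layer = some (x0, y0, x1, y1))
    (hf : x ≥ x1 ∨ y ≥ y1 ∨ x < x0 ∨ y < y0) :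
    processTile layers_bounds layer x y = [] := by
  rw [processTile.eq_def, dif_neg h, hg]
  simp only []
  by_cases h1 : x ≥ x1 ∨ y ≥ y1
  · simp only [if_pos h1]
  · simp only [if_neg h1, if_pos (show x < x0 ∨ y < y0 by omega)]

theorem processTile_succ (layers_bounds : List (Int × Int × Int × Int)) (layer x y : Int)
    (h : ¬(layer < 0 ∨ layer ≥ (layers_bounds.length : Int)))
    (x0 y0 x1 y1 : Int) (hg : PySem.List.pyGet? layers_bounds layer = some (x0, y0, x1, y1))
    (hf : ¬(x ≥ x1 ∨ y ≥ y1 ∨ x < x0 ∨ y < y0)) :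
    processTile layers_bounds layer x y =
      (processTile layers_bounds (layer + 1) (x * 2) (y * 2) ++
       processTile layers_bounds (layer + 1) (x * 2 + 1) (y * 2) ++
       processTile layers_bounds (layer + 1) (x * 2) (y * 2 + 1) ++
       processTile layers_bounds (layer + 1) (x * 2 + 1) (y * 2 + 1)) ++
      [(layer, x, y)] := by
  rw [processTile.eq_def, dif_neg h, hg]
  simp only []
  rw [if_neg (by omega), if_neg (by omega)]

theorem loopB_eq (layers_bounds : List (Int × Int × Int × Int)) :
    ∀ (s : List (Int × Int × Int × Bool)) (acc : List (Int × Int × Int)),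
      (∀ f ∈ s, 0 ≤ f.1) →
      loopB layers_bounds s acc = acc ++ s.flatMap (frameSem layers_bounds) := by
  intro s acc
  induction s, acc using loopB.induct layers_bounds with
  | case1 acc => intro _; simp [loopB]
  | case2 layer x y rest acc ih =>
    intro hs
    rw [loopB, ih (fun f hf => hs f (List.mem_cons_of_mem _ hf))]
    simp [frameSem]
  | case3 layer x y expanded rest acc _h0 _h1 ih =>
    intro hs
    rw [loopB, dif_neg _h0, dif_pos _h1, ih (fun f hf => hs f (List.mem_cons_of_mem _ hf))]
    rw [List.flatMap_cons]
    rw [show frameSem layers_bounds (layer, x, y, expanded) = [] by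
      simp only [frameSem, if_neg _h0]
      exact processTile_out _ _ _ _ (Or.inr _h1)]
    simp
  | case4 layer x y expanded rest acc _h0 _h1 _h2 ih =>
    -- pyGet? = none is impossible here: frames have 0 ≤ layer and layer < length
    intro hs
    have h0 : (0 : Int) ≤ layer := hs (layer, x, y, expanded) (List.mem_cons_self ..)
    rw [PySem.List.pyGet?_eq_some_getElem layers_bounds h0 (by omega)] at _h2
    exact absurd _h2 (by simp)
  | case5 layer x y expanded rest acc _h0 _h1 x0 y0 x1 y1 _h2 _h3 ih =>
    intro hs
    have h0 : (0 : Int) ≤ layer := hs (layer, x, y, expanded) (List.mem_cons_self ..)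
    rw [loopB, dif_neg _h0, dif_neg _h1, _h2]
    simp only []
    rw [dif_pos _h3, ih (fun f hf => hs f (List.mem_cons_of_mem _ hf))]
    rw [List.flatMap_cons]
    rw [show frameSem layers_bounds (layer, x, y, expanded) = [] by
      simp only [frameSem, if_neg _h0]
      exact processTile_fail _ _ _ _ (by omega) _ _ _ _ _h2 _h3]
    simp
  | case6 layer x y expanded rest acc _h0 _h1 x0 y0 x1 y1 _h2 _h3 ih =>
    intro hs
    have h0 : (0 : Int) ≤ layer := hs (layer, x, y, expanded) (List.mem_cons_self ..)
    have hs' : ∀ f ∈ rest, (0:Int) ≤ f.1 := fun f hf => hs f (List.mem_cons_of_mem _ hf)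
    rw [loopB, dif_neg _h0, dif_neg _h1, _h2]
    simp only []
    rw [dif_neg _h3]
    rw [ih (by
      intro f hf
      simp only [List.mem_cons] at hf
      rcases hf with h | h | h | h | h | h <;> first | (subst h; simp; omega) | exact hs' f h)]
    conv_rhs => rw [List.flatMap_cons]
    rw [show frameSem layers_bounds (layer, x, y, expanded) =
          (processTile layers_bounds (layer + 1) (x * 2) (y * 2) ++
           processTile layers_bounds (layer + 1) (x * 2 + 1) (y * 2) ++
           processTile layers_bounds (layer + 1) (x * 2) (y * 2 + 1) ++
           processTile layers_bounds (layer + 1) (x * 2 + 1) (y * 2 + 1)) ++ [(layer, x, y)] by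
      simp only [frameSem, if_neg _h0]
      exact processTile_succ _ _ _ _ (by omega) _ _ _ _ _h2 _h3]
    simp [frameSem, List.append_assoc]

theorem get_tiles_spec : Claim_equal_get_tiles := by
  intro layers_bounds _dom hpre
  unfold Spec_get_tiles get_tiles get_tiles_alt
  cases hb : PySem.List.pyGet? layers_bounds 0 with
  | none => rfl
  | some b =>
    simp only []
    rw [loopB_eq layers_bounds _ [] (by
      intro f hf
      simp only [List.mem_flatMap, List.mem_map] at hf
      obtain ⟨y, _, x, _, rfl⟩ := hf
      simp)]
    simp only [PySem.List.foldl_append_eq_flatMap, List.nil_append, List.flatMap_assoc,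
      List.flatMap_map]
    simp only [frameSem, Bool.false_eq_true, if_false]
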